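-- pv_equiv track=rewrite | github.com/HaeKang/2023-coding-study | week1/[BOJ] 1244.스위치 켜고 끄기.실버4/HK.py | women_case
-- ===== SOURCE A (Python) =====
-- def change_val(val):
--     if val == '0':
--         return '1'
--     else:
--         return '0'
--
-- def women_case(num, arr, switch):
--     start_idx = num - 1
--     end_idx = num + 1
--
--     arr[num] = change_val(arr[num])
--
--     while start_idx >= 0 and end_idx <= switch-1:
--         if arr[start_idx] == arr[end_idx]:
--             arr[start_idx] = change_val(arr[start_idx])
--             arr[end_idx] = change_val(arr[end_idx])
--             start_idx -= 1
--             end_idx += 1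
--         else:
--             break
--
--     return arr
-- ===== SOURCE B (Python) =====
-- # B: measure-then-mutate two-pass rewrite of A's interleaved scan-and-toggle.
-- # Like A it mutates arr in place and returns it (same side effect as A).
-- def change_val(val):
--     if val == '0':
--         return '1'
--     else:
--         return '0'
--
-- def women_case(num, arr, switch):
--     # Pass 1: measure the symmetric radius r on the untouched array.
--     r = 0
--     while num - (r + 1) >= 0 and num + (r + 1) <= switch - 1 \
--             and arr[num - (r + 1)] == arr[num + (r + 1)]:
--         r += 1
--     # Pass 2: toggle the center and every matched pair.
--     arr[num] = change_val(arr[num])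
--     for d in range(1, r + 1):
--         arr[num - d] = change_val(arr[num - d])
--         arr[num + d] = change_val(arr[num + d])
--     return arr
-- ===== Notes on version B (the rewrite author's own statement) =====
-- stated objective: alternative
-- what changed: A interleaves comparing and toggling in one while loop on mutated cells; B first measures the symmetric match radius r on the untouched array, then in a separate pass toggles the center and the r pairs (valid because A only ever compares cells it has not yet toggled).
import Mathlib
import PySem

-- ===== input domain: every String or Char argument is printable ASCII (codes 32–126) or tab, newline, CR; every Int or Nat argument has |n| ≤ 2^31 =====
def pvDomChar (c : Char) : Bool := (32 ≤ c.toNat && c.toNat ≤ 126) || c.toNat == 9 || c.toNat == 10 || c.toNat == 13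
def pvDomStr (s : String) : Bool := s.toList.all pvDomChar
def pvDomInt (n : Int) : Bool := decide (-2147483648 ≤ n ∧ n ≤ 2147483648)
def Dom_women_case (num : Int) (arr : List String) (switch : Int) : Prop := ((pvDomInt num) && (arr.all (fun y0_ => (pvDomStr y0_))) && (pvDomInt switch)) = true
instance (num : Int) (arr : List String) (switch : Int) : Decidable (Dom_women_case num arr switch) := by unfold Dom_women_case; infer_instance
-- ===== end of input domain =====

-- B replaces A's interleaved compare-and-toggle loop by a measure-then-mutate two-pass
-- structure (same result; like A, the Python B mutates arr in place and returns it —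
-- the equivalence proved here is about the returned value).

-- ===== PORT A =====
def chg (val : String) : String := if val = "0" then "1" else "0"

def aLoop (switch : Int) (arr : List String) (s e : Int) : List String :=
  if h : s ≥ 0 ∧ e ≤ switch - 1 then
    if PySem.List.pyGetD arr s "" = PySem.List.pyGetD arr e "" then
      let a1 := PySem.List.pySetD arr s (chg (PySem.List.pyGetD arr s ""))
      let a2 := PySem.List.pySetD a1 e (chg (PySem.List.pyGetD a1 e ""))
      aLoop switch a2 (s - 1) (e + 1)
    else arr
  else arr
termination_by (s + 1).toNat
decreasing_by omega

def women_case (num : Int) (arr : List String) (switch : Int) : List String :=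
  let arr1 := PySem.List.pySetD arr num (chg (PySem.List.pyGetD arr num ""))
  aLoop switch arr1 (num - 1) (num + 1)

-- ===== PORT B =====
-- pass 1: the radius scan on the untouched array
def scanR (num switch : Int) (arr : List String) (r : Int) : Int :=
  if h : num - (r + 1) ≥ 0 ∧ num + (r + 1) ≤ switch - 1 ∧
      PySem.List.pyGetD arr (num - (r + 1)) "" = PySem.List.pyGetD arr (num + (r + 1)) "" then
    scanR num switch arr (r + 1)
  else r
termination_by (num - r).toNat
decreasing_by omega

-- body of B's 'for d in range(1, r+1)' toggle pass
def togStep (num : Int) (a : List String) (d : Int) : List String :=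
  let a1 := PySem.List.pySetD a (num - d) (chg (PySem.List.pyGetD a (num - d) ""))
  PySem.List.pySetD a1 (num + d) (chg (PySem.List.pyGetD a1 (num + d) ""))

def women_case_alt (num : Int) (arr : List String) (switch : Int) : List String :=
  let r := scanR num switch arr 0
  let arr1 := PySem.List.pySetD arr num (chg (PySem.List.pyGetD arr num ""))
  (PySem.List.pyRange 1 (r + 1) 1).foldl (togStep num) arr1

-- ===== PRECONDITION & SPEC =====
-- Pre_ holds exactly when Python A returns normally: num within [-len, len) and the
-- outward scan stops (at the lower bound, the switch bound, or a mismatch) before it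
-- would index past the end of arr; otherwise A raises IndexError.
def Pre_women_case (num : Int) (arr : List String) (switch : Int) : Prop :=
  (-(arr.length : Int) ≤ num ∧ num < arr.length) ∧
  ¬ (2 * num - arr.length ≥ 0 ∧ (arr.length : Int) ≤ switch - 1 ∧
     ∀ d : Nat, d < ((arr.length : Int) - num).toNat → 1 ≤ d →
       PySem.List.pyGetD arr (num - d) "" = PySem.List.pyGetD arr (num + d) "")
instance (num : Int) (arr : List String) (switch : Int) : Decidable (Pre_women_case num arr switch) := by unfold Pre_women_case; infer_instance

def pvWitness_women_case : Int × List String × Int := (1, ["0", "1", "0"], 3)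

def Spec_women_case (num : Int) (arr : List String) (switch : Int) (out : List String) : Prop := out = women_case_alt num arr switch
instance (num : Int) (arr : List String) (switch : Int) (out : List String) : Decidable (Spec_women_case num arr switch out) := by unfold Spec_women_case; infer_instance

-- ===== CLAIM (what is proved, stated in full; the proofs are below) =====
def Claim_equal_women_case : Prop := ∀ (num : Int) (arr : List String) (switch : Int), Dom_women_case num arr switch → Pre_women_case num arr switch → Spec_women_case num arr switch (women_case num arr switch)

-- ===== LEMMAS AND PROOFS =====

theorem getD_setD_ne (xs : List String) (i j : Int) (v : String)
    (hi : 0 ≤ i) (hj : 0 ≤ j) (hne : i ≠ j) :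
    PySem.List.pyGetD (PySem.List.pySetD xs j v) i "" = PySem.List.pyGetD xs i "" := by
  rw [PySem.List.pySetD_of_nonneg (i := j) (h := hj),
      PySem.List.pyGetD_of_nonneg (h := hi), PySem.List.pyGetD_of_nonneg (h := hi)]
  simp [List.getD]
  rw [List.getElem?_set_ne (by omega)]

theorem scanR_ge (num switch : Int) (arr : List String) (r : Int) :
    r ≤ scanR num switch arr r := by
  fun_induction scanR <;> omega

theorem scanR_stop (num switch : Int) (arr : List String) (d : Int)
    (h : ¬ (num - d ≥ 0 ∧ num + d ≤ switch - 1 ∧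
      PySem.List.pyGetD arr (num - d) "" = PySem.List.pyGetD arr (num + d) "")) :
    scanR num switch arr (d - 1) = d - 1 := by
  rw [scanR]
  simp only [show d - 1 + 1 = d from by ring]
  rw [dif_neg h]

theorem main_loop (num switch : Int) (arr : List String) :
    ∀ (n : Nat) (d : Int) (arr' : List String), 1 ≤ d → (num - d + 1).toNat ≤ n →
    (∀ i : Int, 0 ≤ i → (i ≤ num - d ∨ num + d ≤ i) →
      PySem.List.pyGetD arr' i "" = PySem.List.pyGetD arr i "") →
    aLoop switch arr' (num - d) (num + d) =
      (PySem.List.pyRange d (scanR num switch arr (d - 1) + 1) 1).foldl (togStep num) arr' := by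
  intro n
  induction n with
  | zero =>
    intro d arr' hd hn hag
    have hlt : num - d < 0 := by omega
    rw [aLoop, dif_neg (by omega)]
    rw [scanR_stop num switch arr d (by intro hc; omega)]
    simp [show d - 1 + 1 = d from by ring, PySem.List.pyRange]
  | succ n ih =>
    intro d arr' hd hn hag
    rw [aLoop]
    by_cases h1 : num - d ≥ 0 ∧ num + d ≤ switch - 1
    · rw [dif_pos h1]
      have e1 : PySem.List.pyGetD arr' (num - d) "" = PySem.List.pyGetD arr (num - d) "" :=
        hag _ (by omega) (Or.inl le_rfl)
      have e2 : PySem.List.pyGetD arr' (num + d) "" = PySem.List.pyGetD arr (num + d) "" :=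
        hag _ (by omega) (Or.inr le_rfl)
      by_cases h2 : PySem.List.pyGetD arr (num - d) "" = PySem.List.pyGetD arr (num + d) ""
      · rw [if_pos (by rw [e1, e2]; exact h2)]
        have hs : scanR num switch arr (d - 1) = scanR num switch arr d := by
          rw [scanR]
          simp only [show d - 1 + 1 = d from by ring]
          rw [dif_pos ⟨h1.1, h1.2, h2⟩]
        rw [hs]
        have hge : d ≤ scanR num switch arr d := by
          have := scanR_ge num switch arr d; omega
        rw [PySem.List.pyRange_one_cons (by omega), List.foldl_cons]
        have hagp : ∀ i : Int, 0 ≤ i → (i ≤ num - (d + 1) ∨ num + (d + 1) ≤ i) →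
            PySem.List.pyGetD (togStep num arr' d) i "" = PySem.List.pyGetD arr i "" := by
          intro i hi hside
          unfold togStep
          rw [getD_setD_ne _ _ _ _ hi (by omega) (by omega),
              getD_setD_ne _ _ _ _ hi (by omega) (by omega)]
          exact hag i hi (by omega)
        have := ih (d + 1) (togStep num arr' d) (by omega) (by omega) hagp
        rw [show num - (d + 1) = num - d - 1 from by ring,
            show num + (d + 1) = num + d + 1 from by ring,
            show d + 1 - 1 = d from by ring] at this
        exact this
      · rw [if_neg (by rw [e1, e2]; exact h2)]
        rw [scanR_stop num switch arr d (by intro hc; exact h2 hc.2.2)]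
        simp [show d - 1 + 1 = d from by ring, PySem.List.pyRange]
    · rw [dif_neg h1]
      rw [scanR_stop num switch arr d (by intro hc; exact h1 ⟨hc.1, hc.2.1⟩)]
      simp [show d - 1 + 1 = d from by ring, PySem.List.pyRange]

-- ===== VERDICT (by name: the statement is the Claim_ definition above) =====
theorem women_case_spec : Claim_equal_women_case := by
  intro num arr switch _ _
  unfold Spec_women_case women_case women_case_alt
  by_cases hnum : 0 ≤ num
  · have h := main_loop num switch arr (num - 1 + 1).toNat 1
      (PySem.List.pySetD arr num (chg (PySem.List.pyGetD arr num "")))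
      le_rfl le_rfl
      (by
        intro i hi hside
        exact getD_setD_ne _ _ _ _ hi hnum (by omega))
    rw [show (1 : Int) - 1 = 0 from by ring] at h
    exact h
  · rw [aLoop, dif_neg (by omega)]
    rw [scanR, dif_neg (by intro hc; omega)]
    simp [PySem.List.pyRange]
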